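-- pv_equiv track=rewrite | github.com/eddkims/showm_wongo_ui | wongo_check_ui_220405.py | findStringFirst
-- ===== SOURCE A (Python) =====
-- def findStringFirst(data, findStr, num):
--     dataSplit = data.split(findStr)
--     retStr = ''
--     for i, s in enumerate(dataSplit) :
--         if i == 0 :
--             retStr = s + '<span style="background-color:#F5A9F2"><small>&#{};</small></span><span style="background-color:yellow">{}</span>'.format(num, findStr)
--         elif i < len(dataSplit) -1 :
--             retStr += s + findStr
--         else:
--             retStr += s
--
--     return  retStr
-- ===== SOURCE B (Python) =====
-- def findStringFirst(data, findStr, num):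
--     before, _, after = data.partition(findStr)
--     highlight = ('<span style="background-color:#F5A9F2"><small>&#{};</small></span>'
--                  '<span style="background-color:yellow">{}</span>').format(num, findStr)
--     return before + highlight + after
-- ===== Notes on version B (the rewrite author's own statement) =====
-- stated objective: idiomatic
-- what changed: Replaces the split/enumerate/rejoin loop with a single str.partition call: the per-part loop and the index branching (first / middle / last part) disappear; before + highlight + after is returned directly.
import Mathlib
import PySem

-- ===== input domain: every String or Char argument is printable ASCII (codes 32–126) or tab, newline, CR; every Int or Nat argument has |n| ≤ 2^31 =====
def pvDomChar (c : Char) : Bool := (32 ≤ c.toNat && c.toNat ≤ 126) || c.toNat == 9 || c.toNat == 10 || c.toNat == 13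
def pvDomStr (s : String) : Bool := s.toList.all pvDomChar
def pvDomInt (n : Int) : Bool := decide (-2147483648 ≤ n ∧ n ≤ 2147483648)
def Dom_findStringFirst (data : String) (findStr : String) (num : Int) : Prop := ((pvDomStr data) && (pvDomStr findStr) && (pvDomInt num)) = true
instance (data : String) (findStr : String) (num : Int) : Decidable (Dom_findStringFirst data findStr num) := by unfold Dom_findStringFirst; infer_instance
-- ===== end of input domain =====

-- B replaces A's split/enumerate/rejoin loop by a single str.partition (more idiomatic; same cost).


-- the '<span …>&#{};</small></span><span …>{}</span>'.format(num, findStr) markup (shared literal)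
def pvHighlight (num : Int) (findStr : List Char) : List Char :=
  "<span style=\"background-color:#F5A9F2\"><small>&#".toList
    ++ (PySem.Int.toStr num).toList
    ++ ";</small></span><span style=\"background-color:yellow\">".toList
    ++ findStr ++ "</span>".toList

-- ===== PORT A =====
-- data.split(findStr); then the enumerate loop: i == 0 → s + markup; 0 < i < len-1 → += s + findStr; last → += s.
def findStringFirst (data : String) (findStr : String) (num : Int) : String :=
  match PySem.Chars.split? data.toList findStr.toList with
  | none => ""   -- Python raises ValueError here (findStr = ""); excluded by Pre_
  | some dataSplit =>
      String.ofList <|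
        (PySem.List.enumerate dataSplit).foldl (fun retStr is =>
          if is.1 = 0 then is.2 ++ pvHighlight num findStr.toList
          else if is.1 < (dataSplit.length : Int) - 1 then retStr ++ is.2 ++ findStr.toList
          else retStr ++ is.2) []

-- ===== PORT B =====
-- before, _, after = data.partition(findStr); return before + highlight + after.
-- str.partition ported by hand (no PySem primitive): first occurrence via Chars.find,
-- before/after via take/drop; (data, '', '') when absent; ValueError on '' excluded by Pre_.
def findStringFirst_alt (data : String) (findStr : String) (num : Int) : String :=
  if findStr.toList.isEmpty then ""   -- Python raises ValueError here; excluded by Pre_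
  else
    let i := PySem.Chars.find data.toList findStr.toList
    let before := if i = -1 then data.toList else data.toList.take i.toNat
    let after := if i = -1 then [] else data.toList.drop (i.toNat + findStr.toList.length)
    String.ofList (before ++ pvHighlight num findStr.toList ++ after)

-- ===== PRECONDITION & SPEC =====
-- Pre_ excludes exactly findStr = "", on which Python's str.split('') (A) and str.partition('') (B) both raise ValueError.
def Pre_findStringFirst (data : String) (findStr : String) (num : Int) : Prop := findStr ≠ ""
instance (data : String) (findStr : String) (num : Int) : Decidable (Pre_findStringFirst data findStr num) := by unfold Pre_findStringFirst; infer_instance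
def pvWitness_findStringFirst : String × String × Int := ("hello world", "o", 111)

def Spec_findStringFirst (data : String) (findStr : String) (num : Int) (out : String) : Prop := out = findStringFirst_alt data findStr num
instance (data : String) (findStr : String) (num : Int) (out : String) : Decidable (Spec_findStringFirst data findStr num out) := by unfold Spec_findStringFirst; infer_instance

-- ===== CLAIM (what is proved, stated in full; the proofs are below) =====
def Claim_equal_findStringFirst : Prop := ∀ (data : String) (findStr : String) (num : Int), Dom_findStringFirst data findStr num → Pre_findStringFirst data findStr num → Spec_findStringFirst data findStr num (findStringFirst data findStr num)

-- ===== LEMMAS AND PROOFS =====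

theorem pv_go_fuel (sep : List Char) (hsep : sep ≠ []) :
    ∀ fuel fuel' (m cur : List Char) (acc : List (List Char)), m.length < fuel → m.length < fuel' →
      PySem.Chars.splitOn.go sep fuel m cur acc = PySem.Chars.splitOn.go sep fuel' m cur acc := by
  intro fuel
  induction fuel with
  | zero => intro _ _ _ _ h _; omega
  | succ f ih =>
    intro fuel' m cur acc h h'
    cases fuel' with
    | zero => omega
    | succ f' =>
      cases m with
      | nil => simp [PySem.Chars.splitOn.go]
      | cons c rest =>
        have hs1 : 1 ≤ sep.length := List.length_pos_iff.mpr hsep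
        rw [PySem.Chars.splitOn.go, PySem.Chars.splitOn.go]
        by_cases hp : sep.isPrefixOf (c :: rest) = true
        · simp only [hp, if_true]
          apply ih
          · simp at h ⊢; omega
          · simp at h' ⊢; omega
        · simp only [hp, Bool.false_eq_true, if_false]
          apply ih
          · simp at h ⊢; omega
          · simp at h' ⊢; omega

theorem pv_go_acc (sep : List Char) (hsep : sep ≠ []) :
    ∀ fuel (m cur : List Char) (acc : List (List Char)), m.length < fuel →
      PySem.Chars.splitOn.go sep fuel m cur acc
        = acc.reverse ++ PySem.Chars.splitOn.go sep fuel m cur [] := by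
  intro fuel
  induction fuel with
  | zero => intro _ _ _ h; omega
  | succ f ih =>
    intro m cur acc h
    cases m with
    | nil => simp [PySem.Chars.splitOn.go]
    | cons c rest =>
      have hs1 : 1 ≤ sep.length := List.length_pos_iff.mpr hsep
      rw [PySem.Chars.splitOn.go, PySem.Chars.splitOn.go]
      by_cases hp : sep.isPrefixOf (c :: rest) = true
      · simp only [hp, if_true]
        have hd : (List.drop sep.length (c :: rest)).length < f := by simp at h ⊢; omega
        rw [ih _ _ _ hd, ih _ [] [cur.reverse] hd]
        simp
      · simp only [hp, Bool.false_eq_true, if_false]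
        have hr : rest.length < f := by simp at h; omega
        rw [ih _ _ _ hr]

theorem pv_go_none (sep : List Char) (hsep : sep ≠ []) :
    ∀ fuel (l cur : List Char) (acc : List (List Char)), l.length < fuel → ¬ sep <:+: l →
      PySem.Chars.splitOn.go sep fuel l cur acc = acc.reverse ++ [cur.reverse ++ l] := by
  intro fuel
  induction fuel with
  | zero => intro _ _ _ h _; omega
  | succ f ih =>
    intro l cur acc h hin
    cases l with
    | nil => simp [PySem.Chars.splitOn.go]
    | cons c rest =>
      rw [PySem.Chars.splitOn.go]
      have hp : sep.isPrefixOf (c :: rest) = false := by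
        rw [Bool.eq_false_iff]
        intro hc
        exact hin (List.isPrefixOf_iff_prefix.mp hc).isInfix
      simp only [hp, Bool.false_eq_true, if_false]
      rw [ih rest (c :: cur) acc (by simp at h; omega)
        (fun hc => hin (hc.trans (List.suffix_cons c rest).isInfix))]
      simp

theorem pv_go_occ (sep : List Char) (hsep : sep ≠ []) :
    ∀ fuel (l cur : List Char) (acc : List (List Char)) (n : Nat), l.length < fuel →
      sep <+: l.drop n → (∀ i < n, ¬ sep <+: l.drop i) →
      PySem.Chars.splitOn.go sep fuel l cur acc
        = acc.reverse ++ (cur.reverse ++ l.take n)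
            :: PySem.Chars.splitOn (l.drop (n + sep.length)) sep := by
  intro fuel
  induction fuel with
  | zero => intro _ _ _ _ h _ _; omega
  | succ f ih =>
    intro l cur acc n h h1 h2
    cases l with
    | nil =>
      exfalso
      have : sep = [] := List.prefix_nil.mp (by simpa using h1)
      exact hsep this
    | cons c rest =>
      have hs1 : 1 ≤ sep.length := List.length_pos_iff.mpr hsep
      rw [PySem.Chars.splitOn.go]
      by_cases hp : sep.isPrefixOf (c :: rest) = true
      · have hn : n = 0 := by
          by_contra hn0
          exact h2 0 (Nat.pos_of_ne_zero hn0) (by simpa using List.isPrefixOf_iff_prefix.mp hp)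
        subst hn
        simp only [hp, if_true]
        have hd : (List.drop sep.length (c :: rest)).length < f := by simp at h ⊢; omega
        rw [pv_go_acc sep hsep f _ _ _ hd]
        rw [pv_go_fuel sep hsep f ((List.drop sep.length (c :: rest)).length + 1) _ _ _ hd (by omega)]
        rw [show PySem.Chars.splitOn.go sep ((List.drop sep.length (c :: rest)).length + 1)
              (List.drop sep.length (c :: rest)) [] [] =
            PySem.Chars.splitOn (List.drop sep.length (c :: rest)) sep from rfl]
        simp
      · simp only [hp, Bool.false_eq_true, if_false]
        have hn : n ≠ 0 := by
          intro hn0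
          subst hn0
          exact hp (List.isPrefixOf_iff_prefix.mpr (by simpa using h1))
        obtain ⟨n', rfl⟩ : ∃ n', n = n' + 1 := ⟨n - 1, by omega⟩
        rw [ih rest (c :: cur) acc n' (by simp at h; omega)
          (by simpa [List.drop_succ_cons] using h1)
          (fun i hi => by simpa [List.drop_succ_cons] using h2 (i + 1) (by omega))]
        simp [List.take_succ_cons, List.drop_succ_cons, List.append_assoc, Nat.add_right_comm]

theorem pv_splitOn_no_occ (sep cs : List Char) (hsep : sep ≠ []) (h : ¬ sep <:+: cs) :
    PySem.Chars.splitOn cs sep = [cs] := by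
  rw [PySem.Chars.splitOn]
  rw [pv_go_none sep hsep _ _ _ _ (by omega) h]
  rfl

theorem pv_splitOn_occ (sep cs : List Char) (hsep : sep ≠ []) (n : Nat)
    (h1 : sep <+: cs.drop n) (h2 : ∀ i < n, ¬ sep <+: cs.drop i) :
    PySem.Chars.splitOn cs sep
      = cs.take n :: PySem.Chars.splitOn (cs.drop (n + sep.length)) sep := by
  rw [PySem.Chars.splitOn]
  rw [pv_go_occ sep hsep _ _ _ _ n (by omega) h1 h2]
  rfl

theorem pv_splitOn_ne_nil (sep cs : List Char) (hsep : sep ≠ []) :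
    PySem.Chars.splitOn cs sep ≠ [] := by
  by_cases hin : sep <:+: cs
  · have hnn : 0 ≤ PySem.Chars.find cs sep := (PySem.Chars.find_nonneg_iff cs sep).mpr hin
    obtain ⟨h1, h2⟩ := PySem.Chars.find_spec hnn
    rw [pv_splitOn_occ sep cs hsep _ h1 h2]
    simp
  · rw [pv_splitOn_no_occ sep cs hsep hin]; simp

theorem pv_join_splitOn_aux (sep : List Char) (hsep : sep ≠ []) :
    ∀ k (cs : List Char), cs.length < k →
      PySem.Chars.join sep (PySem.Chars.splitOn cs sep) = cs := by
  intro k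
  induction k with
  | zero => intro _ h; omega
  | succ k ih =>
    intro cs h
    by_cases hin : sep <:+: cs
    · have hnn : 0 ≤ PySem.Chars.find cs sep := (PySem.Chars.find_nonneg_iff cs sep).mpr hin
      obtain ⟨h1, h2⟩ := PySem.Chars.find_spec hnn
      set n := (PySem.Chars.find cs sep).toNat with hn
      rw [pv_splitOn_occ sep cs hsep n h1 h2]
      obtain ⟨t, ht⟩ := h1
      have hs1 : 1 ≤ sep.length := List.length_pos_iff.mpr hsep
      have hnlen : n ≤ cs.length := by
        have := congrArg List.length ht
        simp [List.length_drop] at this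
        omega
      have htd : t = cs.drop (n + sep.length) := by
        have := congrArg (List.drop sep.length) ht
        simpa [List.drop_drop, Nat.add_comm] using this
      obtain ⟨p0, rest, hpr⟩ : ∃ p0 rest,
          PySem.Chars.splitOn (cs.drop (n + sep.length)) sep = p0 :: rest := by
        cases hsp : PySem.Chars.splitOn (cs.drop (n + sep.length)) sep with
        | nil => exact absurd hsp (pv_splitOn_ne_nil sep _ hsep)
        | cons a b => exact ⟨a, b, rfl⟩
      rw [hpr, PySem.Chars.join_cons_cons, ← hpr]
      rw [ih (cs.drop (n + sep.length)) (by
        have := congrArg List.length ht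
        simp [List.length_drop] at this ⊢
        omega)]
      calc cs.take n ++ sep ++ cs.drop (n + sep.length)
          = cs.take n ++ (sep ++ t) := by rw [htd]; simp [List.append_assoc]
        _ = cs.take n ++ cs.drop n := by rw [← ht]
        _ = cs := List.take_append_drop n cs
    · rw [pv_splitOn_no_occ sep cs hsep hin, PySem.Chars.join_singleton]

theorem pv_fold_tail (sep hl : List Char) (n : Nat) :
    ∀ (rest : List (List Char)) (j : Int) (acc : List Char), 1 ≤ j → j + rest.length = (n : Int) →
      (PySem.List.enumerate rest j).foldl (fun retStr is =>
          if is.1 = 0 then is.2 ++ hl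
          else if is.1 < (n : Int) - 1 then retStr ++ is.2 ++ sep
          else retStr ++ is.2) acc
        = acc ++ PySem.Chars.join sep rest := by
  intro rest
  induction rest with
  | nil => intro j acc hj hn; simp [PySem.List.enumerate, PySem.Chars.join_nil]
  | cons a rest' ih =>
    intro j acc hj hn
    rw [PySem.List.enumerate_cons]
    simp only [List.foldl_cons]
    have hj0 : ¬ (j = 0) := by omega
    cases rest' with
    | nil =>
      have : ¬ (j < (n : Int) - 1) := by simp at hn; omega
      simp only [hj0, if_false, this, PySem.List.enumerate, List.foldl_nil,
        PySem.Chars.join_singleton]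
    | cons b rest'' =>
      have hlt : j < (n : Int) - 1 := by simp at hn; omega
      simp only [hj0, if_false, hlt, if_true]
      rw [ih (j + 1) _ (by omega) (by simp at hn ⊢; omega)]
      rw [PySem.Chars.join_cons_cons]
      simp [List.append_assoc]

theorem pv_core (sep cs hl : List Char) (hsep : sep ≠ []) :
    (PySem.List.enumerate (PySem.Chars.splitOn cs sep)).foldl (fun retStr is =>
        if is.1 = 0 then is.2 ++ hl
        else if is.1 < ((PySem.Chars.splitOn cs sep).length : Int) - 1 then retStr ++ is.2 ++ sep
        else retStr ++ is.2) []
    = (if PySem.Chars.find cs sep = -1 then cs else cs.take (PySem.Chars.find cs sep).toNat)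
        ++ hl ++
      (if PySem.Chars.find cs sep = -1 then [] else
        cs.drop ((PySem.Chars.find cs sep).toNat + sep.length)) := by
  by_cases hin : sep <:+: cs
  · have hnn : 0 ≤ PySem.Chars.find cs sep := (PySem.Chars.find_nonneg_iff cs sep).mpr hin
    have hfne : ¬ (PySem.Chars.find cs sep = -1) := by omega
    obtain ⟨h1, h2⟩ := PySem.Chars.find_spec hnn
    rw [pv_splitOn_occ sep cs hsep _ h1 h2]
    rw [PySem.List.enumerate_cons]
    simp only [List.foldl_cons, if_true]
    rw [show (0 : Int) + 1 = 1 from rfl]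
    rw [pv_fold_tail sep hl
      (List.take (PySem.Chars.find cs sep).toNat cs ::
        PySem.Chars.splitOn (cs.drop ((PySem.Chars.find cs sep).toNat + sep.length)) sep).length
      _ 1 _ (by omega) (by simp; omega)]
    rw [pv_join_splitOn_aux sep hsep
      ((cs.drop ((PySem.Chars.find cs sep).toNat + sep.length)).length + 1) _ (by omega)]
    simp [hfne, List.append_assoc]
  · have hf : PySem.Chars.find cs sep = -1 := (PySem.Chars.find_eq_neg_one_iff cs sep).mpr hin
    rw [pv_splitOn_no_occ sep cs hsep hin]
    rw [PySem.List.enumerate_cons]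
    simp [hf, PySem.List.enumerate]

theorem pv_main (data : String) (findStr : String) (num : Int) (hpre : findStr ≠ "") :
    findStringFirst data findStr num = findStringFirst_alt data findStr num := by
  have hsep : findStr.toList ≠ [] := by simp_all
  have hne : findStr.toList.isEmpty = false := by simp_all
  rw [findStringFirst, findStringFirst_alt]
  rw [show PySem.Chars.split? data.toList findStr.toList
        = some (PySem.Chars.splitOn data.toList findStr.toList) from by
    simp [PySem.Chars.split?, hne]]
  simp only [hne, Bool.false_eq_true, if_false]
  rw [pv_core findStr.toList data.toList (pvHighlight num findStr.toList) hsep]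

-- ===== VERDICT (by name: the statement is the Claim_ definition above) =====
theorem findStringFirst_spec : Claim_equal_findStringFirst := by
  intro data findStr num hdom hpre
  exact pv_main data findStr num hpre
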